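-- pv_equiv track=rewrite | github.com/GaoJianxiang/2017A2CS | CH25/Recursion1.py | count8
-- ===== SOURCE A (Python) =====
-- def count8(n):
--     if n==0:
--         return 0
--     if n%10 ==8:
--         if (n//10)%10 == 8:
--             return count8(n//10)+2
--         return count8(n//10)+1
--     return count8(n//10)
-- ===== SOURCE B (Python) =====
-- def count8(n):
--     count = 0
--     prev = None
--     while n > 0:
--         d = n % 10
--         if d == 8:
--             count += 1
--             if prev == 8:
--                 count += 1
--         prev = d
--         n //= 10
--     return count
-- ===== Notes on version B (the rewrite author's own statement) =====
-- stated objective: alternative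
-- what changed: Replaces the top-down recursion with an iterative bottom-up digit loop keeping a running count and the previous digit.
import Mathlib
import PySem

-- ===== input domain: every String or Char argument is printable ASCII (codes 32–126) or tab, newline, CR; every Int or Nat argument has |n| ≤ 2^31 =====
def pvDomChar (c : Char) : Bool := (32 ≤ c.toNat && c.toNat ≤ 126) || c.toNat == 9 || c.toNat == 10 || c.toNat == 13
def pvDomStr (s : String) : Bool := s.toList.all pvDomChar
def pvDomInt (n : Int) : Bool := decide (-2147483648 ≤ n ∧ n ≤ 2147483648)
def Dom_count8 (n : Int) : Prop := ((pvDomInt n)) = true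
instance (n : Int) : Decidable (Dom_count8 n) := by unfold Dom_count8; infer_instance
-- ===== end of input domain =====

-- B replaces A's top-down recursion by an iterative bottom-up digit loop (different decomposition, same cost).

-- ===== PORT A =====
-- Literal port of A's recursion; the 'n < 0' branch is only a termination guard:
-- Python A never returns on negative n (RecursionError), which Pre_count8 excludes.
def count8 (n : Int) : Int :=
  if n = 0 then 0
  else if n < 0 then 0
  else
    if PySem.Int.mod n 10 = 8 then
      if PySem.Int.mod (PySem.Int.floordiv n 10) 10 = 8 then
        count8 (PySem.Int.floordiv n 10) + 2
      else
        count8 (PySem.Int.floordiv n 10) + 1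
    else count8 (PySem.Int.floordiv n 10)
termination_by n.toNat
decreasing_by
  all_goals
    rw [PySem.Int.floordiv_eq_ediv_of_pos (by omega)]
    have _hd := Int.mul_ediv_add_emod n 10
    have _hr1 : 0 ≤ n % 10 := Int.emod_nonneg n (by norm_num)
    have _hr2 : n % 10 < 10 := Int.emod_lt_of_pos n (by norm_num)
    omega

-- ===== PORT B =====
-- the while loop of Source B, as a tail recursion over the same state (n, prev, count)
def count8AltGo (n : Int) (prev : Option Int) (count : Int) : Int :=
  if n > 0 then
    let d := PySem.Int.mod n 10
    let count := if d = 8 then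
        (if prev = some 8 then count + 1 + 1 else count + 1)
      else count
    count8AltGo (PySem.Int.floordiv n 10) (some d) count
  else count
termination_by n.toNat
decreasing_by
  rw [PySem.Int.floordiv_eq_ediv_of_pos (by omega)]
  have _hd := Int.mul_ediv_add_emod n 10
  have _hr1 : 0 ≤ n % 10 := Int.emod_nonneg n (by norm_num)
  have _hr2 : n % 10 < 10 := Int.emod_lt_of_pos n (by norm_num)
  omega

def count8_alt (n : Int) : Int := count8AltGo n none 0

-- ===== PRECONDITION & SPEC =====
-- Pre_ excludes negative n, on which Python A recurses forever (RecursionError).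
def Pre_count8 (n : Int) : Prop := 0 ≤ n
instance (n : Int) : Decidable (Pre_count8 n) := by unfold Pre_count8; infer_instance
def pvWitness_count8 : Int := (888)

def Spec_count8 (n : Int) (out : Int) : Prop := out = count8_alt n
instance (n : Int) (out : Int) : Decidable (Spec_count8 n out) := by unfold Spec_count8; infer_instance

-- ===== CLAIM (what is proved, stated in full; the proofs are below) =====
def Claim_equal_count8 : Prop := ∀ (n : Int), Dom_count8 n → Pre_count8 n → Spec_count8 n (count8 n)

-- ===== LEMMAS AND PROOFS =====

-- loop invariant: the running count plus a pending bonus (the previous digit was 8 and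
-- the current last digit is 8) equals A's recursive count of the remaining digits
theorem count8AltGo_inv (k : Nat) :
    ∀ (n : Int) (prev : Option Int) (c : Int), 0 ≤ n → n.toNat = k →
      count8AltGo n prev c =
        c + count8 n +
          (if 0 < n ∧ PySem.Int.mod n 10 = 8 ∧ prev = some 8 then 1 else 0) := by
  induction k using Nat.strong_induction_on with
  | _ k ih =>
    intro n prev c hn hk
    by_cases hpos : 0 < n
    · have h10 : (0:Int) < 10 := by omega
      have hq : PySem.Int.floordiv n 10 = n / 10 := PySem.Int.floordiv_eq_ediv_of_pos h10
      have _hd := Int.mul_ediv_add_emod n 10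
      have _hr1 : 0 ≤ n % 10 := Int.emod_nonneg n (by norm_num)
      have _hr2 : n % 10 < 10 := Int.emod_lt_of_pos n (by norm_num)
      have hq1 : n / 10 < n := by omega
      have hq2 : 0 ≤ n / 10 := by omega
      rw [count8AltGo]
      simp only [hpos, if_pos]
      rw [hq, ih (n / 10).toNat (by omega) (n / 10) _ _ hq2 rfl]
      have hne : ¬ n = 0 := by omega
      have hnlt : ¬ n < 0 := by omega
      conv_rhs => rw [count8]
      rw [if_neg hne, if_neg hnlt, hq]
      -- when n / 10 = 0 its last digit is 0 ≠ 8, so the pending bonus vanishes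
      by_cases hz : 0 < n / 10
      · have hzne : ¬ n / 10 = 0 := by omega
        simp only [Option.some.injEq, true_and]
        by_cases h8 : PySem.Int.mod n 10 = 8 <;>
          by_cases h9 : PySem.Int.mod (n / 10) 10 = 8 <;>
          by_cases hp8 : prev = some 8 <;>
          simp [h8, h9, hp8, hz, hzne] <;>
          omega
      · have hz0 : n / 10 = 0 := by omega
        rw [hz0]
        have hm0 : PySem.Int.mod (0:Int) 10 = 0 := by decide
        have hc0 : count8 0 = 0 := by rw [count8]; simp
        simp only [hm0, hc0, Option.some.injEq, true_and]
        by_cases h8 : PySem.Int.mod n 10 = 8 <;>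
          by_cases hp8 : prev = some 8 <;>
          simp [h8, hp8] <;>
          omega
    · have h0 : n = 0 := by omega
      subst h0
      rw [count8AltGo, count8]
      simp

-- ===== VERDICT (by name: the statement is the Claim_ definition above) =====
theorem count8_spec : Claim_equal_count8 := by
  intro n _ hpre
  unfold Spec_count8 count8_alt
  rw [count8AltGo_inv n.toNat n none 0 hpre rfl]
  simp
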